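-- pv_equiv track=rewrite | github.com/ElectionLens/ElectionLens | scripts/fix_postal_accuracy.py | match_candidate
-- ===== SOURCE A (Python) =====
-- def normalize_name(name):
--     """Normalize candidate name for matching."""
--     if not name:
--         return ""
--     return name.upper().replace(".", " ").replace(",", " ").split()[0] if name else ""
--
-- def match_candidate(booth_name, official_candidates):
--     """Find matching official candidate for booth candidate."""
--     booth_norm = normalize_name(booth_name)
--     for oc in official_candidates:
--         if normalize_name(oc.get("name", "")) == booth_norm:
--             return oc
--     # Partial match
--     for oc in official_candidates:
--         if booth_norm and booth_norm in normalize_name(oc.get("name", "")):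
--             return oc
--     return None
-- ===== SOURCE B (Python) =====
-- def normalize_name(name):
--     """Normalize candidate name for matching."""
--     if not name:
--         return ""
--     return name.upper().replace(".", " ").replace(",", " ").split()[0]
--
-- def match_candidate(booth_name, official_candidates):
--     """Single pass: return on exact match, remember the first partial match."""
--     booth_norm = normalize_name(booth_name)
--     first_partial = None
--     for oc in official_candidates:
--         norm = normalize_name(oc.get("name", ""))
--         if norm == booth_norm:
--             return oc
--         if booth_norm and first_partial is None and booth_norm in norm:
--             first_partial = oc
--     return first_partial
-- ===== Notes on version B (the rewrite author's own statement) =====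
-- stated objective: alternative
-- what changed: A's two separate scans (exact pass, then partial pass) are folded into one pass that returns immediately on an exact match and remembers the first partial match as a fallback, normalizing each candidate name once instead of up to twice.
-- outside the precondition, e.g. on match_candidate('A', [{'name': 'A'}, {'name': '.'}]): A returns {'name': 'A'}, B returns {'name': 'A'}
import Mathlib
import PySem

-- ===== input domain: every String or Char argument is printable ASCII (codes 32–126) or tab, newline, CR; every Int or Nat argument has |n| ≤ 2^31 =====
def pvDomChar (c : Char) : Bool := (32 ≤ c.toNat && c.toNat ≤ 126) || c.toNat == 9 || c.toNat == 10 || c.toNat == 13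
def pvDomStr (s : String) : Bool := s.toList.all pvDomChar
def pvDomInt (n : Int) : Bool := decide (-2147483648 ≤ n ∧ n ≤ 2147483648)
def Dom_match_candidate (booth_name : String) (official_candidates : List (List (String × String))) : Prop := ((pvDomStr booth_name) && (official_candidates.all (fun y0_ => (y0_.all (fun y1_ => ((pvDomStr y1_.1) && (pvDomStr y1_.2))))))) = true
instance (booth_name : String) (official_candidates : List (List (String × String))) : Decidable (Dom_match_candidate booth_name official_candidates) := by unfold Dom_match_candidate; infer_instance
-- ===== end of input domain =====

-- B folds A's two scans (exact pass, then partial pass) into one pass that returns at once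
-- on an exact match and remembers the first partial match as a fallback (objective: alternative).


-- ===== PORT A =====
-- normalize_name; where Python's split()[0] raises IndexError (nonempty input that is all
-- whitespace/'.'/','), this returns "" — Pre_match_candidate excludes exactly those inputs.
def pyNormalize (name : String) : String :=
  if name = "" then ""
  else (PySem.Str.split₀ (PySem.Str.replace (PySem.Str.replace (PySem.Str.upper name) "." " ") "," " ")).headD ""

-- oc.get("name", "")
def ocName (oc : List (String × String)) : String := (PySem.Dict.mk oc).getD "name" ""

-- A's first loop: exact match on the normalized first name
def findExact (bn : String) : List (List (String × String)) → Option (List (String × String))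
  | [] => none
  | oc :: rest => if pyNormalize (ocName oc) = bn then some oc else findExact bn rest

-- A's second loop: 'booth_norm and booth_norm in normalize_name(...)'
def findPartial (bn : String) : List (List (String × String)) → Option (List (String × String))
  | [] => none
  | oc :: rest =>
      if bn ≠ "" ∧ PySem.Str.isIn bn (pyNormalize (ocName oc)) = true then some oc
      else findPartial bn rest

def match_candidate (booth_name : String) (official_candidates : List (List (String × String))) : Option (List (String × String)) :=
  let booth_norm := pyNormalize booth_name
  match findExact booth_norm official_candidates with
  | some oc => some oc
  | none => findPartial booth_norm official_candidates

-- ===== PORT B =====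
-- single pass: return on exact match, remember the first partial match in fp
def altGo (bn : String) (fp : Option (List (String × String))) : List (List (String × String)) → Option (List (String × String))
  | [] => fp
  | oc :: rest =>
      let nm := pyNormalize (ocName oc)
      if nm = bn then some oc
      else if bn ≠ "" ∧ fp = none ∧ PySem.Str.isIn bn nm = true then altGo bn (some oc) rest
      else altGo bn fp rest

def match_candidate_alt (booth_name : String) (official_candidates : List (List (String × String))) : Option (List (String × String)) :=
  altGo (pyNormalize booth_name) none official_candidates

-- ===== PRECONDITION & SPEC =====
-- A name is safe iff Python's normalize_name returns on it (it is empty, or after replacing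
-- '.'/',' by spaces some non-whitespace character remains; otherwise split()[0] raises IndexError).
def nameSafe (s : String) : Bool :=
  (s == "") || s.toList.any (fun c => !(PySem.Chars.isspace c) && c != '.' && c != ',')

-- Pre_ excludes inputs where normalize_name raises IndexError on booth_name or on some candidate's
-- name. This is slightly wider than A's actual raise set: if an exact match occurs before the first
-- unsafe candidate name, A (and B) still return — see claim.json "cites" for such an excluded input.
def Pre_match_candidate (booth_name : String) (official_candidates : List (List (String × String))) : Prop :=
  (nameSafe booth_name && official_candidates.all (fun oc => nameSafe (ocName oc))) = true
instance (booth_name : String) (official_candidates : List (List (String × String))) : Decidable (Pre_match_candidate booth_name official_candidates) := by unfold Pre_match_candidate; infer_instance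

def pvWitness_match_candidate : String × (List (List (String × String))) :=
  ("jo", [[("name", "AL SMITH")], [("name", "JOHN, A")], [("party", "X")]])

def Spec_match_candidate (booth_name : String) (official_candidates : List (List (String × String))) (out : Option (List (String × String))) : Prop := out = match_candidate_alt booth_name official_candidates
instance (booth_name : String) (official_candidates : List (List (String × String))) (out : Option (List (String × String))) : Decidable (Spec_match_candidate booth_name official_candidates out) := by unfold Spec_match_candidate; infer_instance

-- ===== CLAIM (what is proved, stated in full; the proofs are below) =====
def Claim_equal_match_candidate : Prop := ∀ (booth_name : String) (official_candidates : List (List (String × String))), Dom_match_candidate booth_name official_candidates → Pre_match_candidate booth_name official_candidates → Spec_match_candidate booth_name official_candidates (match_candidate booth_name official_candidates)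

-- ===== LEMMAS AND PROOFS =====
-- loop invariant of B's single pass: an exact match anywhere wins; otherwise the pending
-- first partial fp wins; otherwise the first partial of the remaining list.
theorem altGo_eq (bn : String) (ocs : List (List (String × String))) :
    ∀ fp : Option (List (String × String)),
      altGo bn fp ocs =
        match findExact bn ocs with
        | some oc => some oc
        | none => match fp with
                  | some p => some p
                  | none => findPartial bn ocs := by
  induction ocs with
  | nil => intro fp; cases fp <;> simp [altGo, findExact, findPartial]
  | cons oc rest ih =>
    intro fp
    by_cases h1 : pyNormalize (ocName oc) = bn
    · simp [altGo, findExact, h1]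
    · by_cases h2 : bn ≠ "" ∧ PySem.Str.isIn bn (pyNormalize (ocName oc)) = true
      · cases fp with
        | none =>
          simp only [altGo, findExact, findPartial, h1, ih]
          simp only [ne_eq, h2.1, not_false_eq_true, h2.2, and_true, if_true]
          cases findExact bn rest <;> simp
        | some p => simp [altGo, findExact, h1, h2.1, ih]
      · have hc : ¬ (bn ≠ "" ∧ fp = none ∧ PySem.Str.isIn bn (pyNormalize (ocName oc)) = true) := by
          rintro ⟨ha, -, hb⟩; exact h2 ⟨ha, hb⟩
        simp only [altGo, findExact, findPartial, if_neg h1, if_neg hc, if_neg h2]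
        exact ih fp

-- ===== VERDICT (by name: the statement is the Claim_ definition above) =====
theorem match_candidate_spec : Claim_equal_match_candidate := by
  intro booth_name ocs _ _
  unfold Spec_match_candidate match_candidate match_candidate_alt
  rw [altGo_eq]
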